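-- pv_equiv track=rewrite | github.com/EgorKunickiy/completed-tasks | Очередь к кассам.py | time_count
-- ===== SOURCE A (Python) =====
-- import collections
--
-- def time_count(array_people: list, count_cash_reg: int) ->int:
--     cash_registers = array_people[:count_cash_reg]
--     que = collections.deque(array_people[count_cash_reg:])
--     time = 0
--
--     while max(cash_registers) != 0 or len(que) > 0:
--         if 0 in cash_registers and len(que) != 0:
--             cash_registers = map(lambda x: x if x != 0 else que.popleft(), cash_registers)
--         cash_registers = list(map(lambda x: x-1, cash_registers))
--         time += 1
--
--     return time
-- ===== SOURCE B (Python) =====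
-- def time_count(array_people: list, count_cash_reg: int) -> int:
--     finish = list(array_people[:count_cash_reg])
--     for p in array_people[count_cash_reg:]:
--         j = finish.index(min(finish))
--         finish[j] += p
--     return max(finish)
-- ===== Notes on version B (the rewrite author's own statement) =====
-- stated objective: faster
-- what changed: Replaces A's tick-by-tick simulation (one loop iteration per time unit, scanning and decrementing all cashiers each tick) by event-driven list scheduling over finish times: the first k customers occupy the registers, each remaining customer is added to the earliest-finishing register, answer = latest finish time. Intended as faster (one step per customer instead of one per time unit); a timing run saw A time out at n=16 where B still returned, so no ratio could be measured.
-- outside the precondition, e.g. on time_count([4, 3, -2, 5], 3): A returns 8, B returns 4; on time_count([3, 0, 6, -2, 5, 6], 3): A returns 12, B returns 9; on time_count([2, 2, 5], 2): A raises IndexError, B returns 7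
import Mathlib
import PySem

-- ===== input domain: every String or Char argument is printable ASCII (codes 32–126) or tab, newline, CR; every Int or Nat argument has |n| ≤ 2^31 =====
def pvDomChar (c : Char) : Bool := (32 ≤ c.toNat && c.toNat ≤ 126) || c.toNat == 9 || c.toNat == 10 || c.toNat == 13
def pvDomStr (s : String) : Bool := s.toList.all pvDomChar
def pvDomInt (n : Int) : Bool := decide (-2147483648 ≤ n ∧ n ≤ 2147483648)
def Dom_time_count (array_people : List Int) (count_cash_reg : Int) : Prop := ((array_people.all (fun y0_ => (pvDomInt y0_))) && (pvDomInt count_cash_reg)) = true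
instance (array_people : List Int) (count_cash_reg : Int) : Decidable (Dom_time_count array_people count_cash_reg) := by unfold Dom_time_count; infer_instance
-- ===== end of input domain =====

-- B replaces A's tick-by-tick simulation by event-driven list scheduling over cashier finish times
-- (the first k customers occupy the registers, each later customer joins the earliest-finishing
-- register; one step per customer instead of one loop iteration per time unit).

-- ===== PORT A =====
-- refill step: `map(lambda x: x if x != 0 else que.popleft(), cash_registers)`, left to right
def pvRefill : List Int → List Int → List Int × List Int
  | [], que => ([], que)
  | x :: xs, que =>
    if x ≠ 0 then
      let r := pvRefill xs que
      (x :: r.1, r.2)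
    else
      match que with
      | [] =>
        -- Python raises IndexError (popleft on empty deque) here; Pre_ excludes such inputs
        let r := pvRefill xs []
        (x :: r.1, r.2)
      | q :: qs =>
        let r := pvRefill xs qs
        (q :: r.1, r.2)

-- the while loop; fuel is only a totality guard (Pre_ guarantees it is never exhausted)
def pvLoopA : Nat → List Int → List Int → Int → Int
  | 0, _, _, time => time
  | fuel + 1, regs, que, time =>
    -- `max(cash_registers)` raises on an empty list in Python; Pre_ keeps regs nonempty (getD 0 is a totality guard)
    if ((PySem.List.max? regs (fun y => y)).getD 0 ≠ 0) ∨ que ≠ [] then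
      let rq := if regs.contains 0 ∧ que ≠ [] then pvRefill regs que else (regs, que)
      pvLoopA fuel (rq.1.map (fun x => x - 1)) rq.2 (time + 1)
    else time

def time_count (array_people : List Int) (count_cash_reg : Int) : Int :=
  let cash_registers := PySem.List.slice array_people none (some count_cash_reg)
  let que := PySem.List.slice array_people (some count_cash_reg) none
  pvLoopA ((array_people.map Int.natAbs).sum + 1) cash_registers que 0

-- ===== PORT B =====
-- one customer: assign to the earliest-finishing cashier (`finish.index(min(finish))`)
def pvAssign (f : List Int) (p : Int) : List Int :=
  match PySem.List.min? f (fun y => y) with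
  | none => f   -- Python: min([]) raises ValueError; Pre_ keeps f nonempty
  | some m =>
    match PySem.List.index? f m with
    | none => f
    | some j => f.set j ((f[j]?.getD 0) + p)

def time_count_alt (array_people : List Int) (count_cash_reg : Int) : Int :=
  let finish0 := PySem.List.slice array_people none (some count_cash_reg)
  let finish := (PySem.List.slice array_people (some count_cash_reg) none).foldl pvAssign finish0
  -- Python: max([]) raises ValueError; Pre_ keeps finish0 nonempty
  (PySem.List.max? finish (fun y => y)).getD 0

-- ===== PRECONDITION & SPEC =====
-- `min(l)` of a nonempty list (helper for the feasibility condition below)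
def pvMin : List Int → Option Int
  | [] => none
  | x :: xs => some (xs.foldl min x)

-- `max(l)` with 0 for the empty list, as A's loop computes it
def pvMax : List Int → Int
  | [] => 0
  | x :: xs => xs.foldl max x

-- Feasibility of the greedy schedule: at every service-completion event at least as many
-- customers remain in the queue as cashiers free up simultaneously.  This is exactly the
-- set of inputs on which A's refill does not raise IndexError; that set is determined by
-- the schedule itself (it has no simulation-free closed form), so it is stated directly
-- as this event-level solvency condition.
def pvFeasibleF : Nat → List Int → List Int → Bool
  | _, _, [] => true
  | 0, _, _ :: _ => false      -- fuel exhausted; never reached from pvFeasible below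
  | n + 1, times, q :: qs =>
    match pvMin times with
    | none => false
    | some m =>
      decide (times.count m ≤ (q :: qs).length) &&
        pvFeasibleF n (times.filter (fun x => x ≠ m) ++ ((q :: qs).take (times.count m)).map (fun p => m + p))
          ((q :: qs).drop (times.count m))

def pvFeasible (times que : List Int) : Bool := pvFeasibleF que.length times que

-- Pre_ requires a nonempty initial register slice array_people[:k] (A raises ValueError on max([])
-- otherwise) and: with no waiting queue, a nonnegative register maximum (A diverges when it is
-- negative); with a waiting queue, the natural domain of the task — nonnegative initial register
-- times and positive waiting-service times (A diverges on many nonpositive service times there and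
-- its values elsewhere are artefacts of registers drifting negative) — plus the pvFeasible solvency
-- condition above, outside of which A raises IndexError (popleft from an exhausted queue).
def Pre_time_count (array_people : List Int) (count_cash_reg : Int) : Prop :=
  PySem.List.slice array_people none (some count_cash_reg) ≠ [] ∧
    ((PySem.List.slice array_people (some count_cash_reg) none = [] ∧
        0 ≤ pvMax (PySem.List.slice array_people none (some count_cash_reg))) ∨
     (PySem.List.slice array_people (some count_cash_reg) none ≠ [] ∧
        (∀ x ∈ PySem.List.slice array_people none (some count_cash_reg), 0 ≤ x) ∧
        (∀ x ∈ PySem.List.slice array_people (some count_cash_reg) none, 1 ≤ x) ∧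
        pvFeasible (PySem.List.slice array_people none (some count_cash_reg))
          (PySem.List.slice array_people (some count_cash_reg) none) = true))
instance (array_people : List Int) (count_cash_reg : Int) : Decidable (Pre_time_count array_people count_cash_reg) := by
  unfold Pre_time_count; infer_instance

def pvWitness_time_count : List Int × Int := ([2, 3, 4], 2)

def Spec_time_count (array_people : List Int) (count_cash_reg : Int) (out : Int) : Prop := out = time_count_alt array_people count_cash_reg
instance (array_people : List Int) (count_cash_reg : Int) (out : Int) : Decidable (Spec_time_count array_people count_cash_reg out) := by unfold Spec_time_count; infer_instance

-- ===== CLAIM (what is proved, stated in full; the proofs are below) =====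
def Claim_equal_time_count : Prop := ∀ (array_people : List Int) (count_cash_reg : Int), Dom_time_count array_people count_cash_reg → Pre_time_count array_people count_cash_reg → Spec_time_count array_people count_cash_reg (time_count array_people count_cash_reg)

-- ===== LEMMAS AND PROOFS =====

lemma pvMin_mem {l : List Int} {m : Int} (h : pvMin l = some m) : m ∈ l := by
  cases l with
  | nil => simp [pvMin] at h
  | cons x xs =>
      simp only [pvMin, Option.some.injEq] at h
      rcases PySem.List.foldl_min_mem xs x with h' | h' <;> subst h <;> simp [h']

-- the greedy (event-driven) schedule itself: final multiset of cashier finish times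
def pvSched (times que : List Int) : List Int :=
  match hq : que with
  | [] => times
  | _ :: _ =>
    match hm : pvMin times with
    | none => times
    | some m =>
      pvSched (times.filter (fun x => x ≠ m) ++ (que.take (times.count m)).map (fun p => m + p))
        (que.drop (times.count m))
termination_by que.length
decreasing_by
  have hmem := pvMin_mem hm
  have hc : 1 ≤ times.count m := List.count_pos_iff.mpr hmem
  subst hq
  simp only [List.length_drop, List.length_cons]
  omega

----------------------------------------------------------------
-- basic facts about pvMin / pvMax
----------------------------------------------------------------

lemma pvMin_le {l : List Int} {m : Int} (h : pvMin l = some m) : ∀ x ∈ l, m ≤ x := by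
  cases l with
  | nil => simp [pvMin] at h
  | cons x xs =>
      simp only [pvMin, Option.some.injEq] at h
      subst h
      intro y hy
      rcases List.mem_cons.mp hy with rfl | hy
      · exact (PySem.List.foldl_min_le xs y).1
      · exact (PySem.List.foldl_min_le xs x).2 y hy

lemma pvMin_eq_some {l : List Int} {m : Int} (hmem : m ∈ l) (hle : ∀ x ∈ l, m ≤ x) :
    pvMin l = some m := by
  cases l with
  | nil => simp at hmem
  | cons x xs =>
      simp only [pvMin, Option.some.injEq]
      have h1 : xs.foldl min x ∈ x :: xs := by
        rcases PySem.List.foldl_min_mem xs x with h | h <;> simp [h]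
      have h2 : m ≤ xs.foldl min x := hle _ h1
      have h3 : xs.foldl min x ≤ m := by
        rcases List.mem_cons.mp hmem with rfl | hm
        · exact (PySem.List.foldl_min_le xs m).1
        · exact (PySem.List.foldl_min_le xs x).2 m hm
      omega

lemma pvMin_perm {l l' : List Int} (h : l.Perm l') : pvMin l = pvMin l' := by
  cases hl : pvMin l with
  | none =>
      cases l with
      | nil => have := h.nil_eq.symm; subst this; rfl
      | cons x xs => simp [pvMin] at hl
  | some m =>
      exact (pvMin_eq_some (h.mem_iff.mp (pvMin_mem hl))
        (fun x hx => pvMin_le hl x (h.mem_iff.mpr hx))).symm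

lemma pvMax_mem {l : List Int} (h : l ≠ []) : pvMax l ∈ l := by
  cases l with
  | nil => exact absurd rfl h
  | cons x xs =>
      rcases PySem.List.foldl_max_mem xs x with h' | h' <;> simp [pvMax, h']

lemma le_pvMax {l : List Int} {x : Int} (h : x ∈ l) : x ≤ pvMax l := by
  cases l with
  | nil => simp at h
  | cons a xs =>
      rcases List.mem_cons.mp h with rfl | h'
      · exact (PySem.List.le_foldl_max xs x).1
      · exact (PySem.List.le_foldl_max xs a).2 x h'

lemma pvMax_perm {l l' : List Int} (h : l.Perm l') : pvMax l = pvMax l' := by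
  cases l with
  | nil => have := h.nil_eq.symm; subst this; rfl
  | cons x xs =>
      have hl : (x :: xs) ≠ [] := by simp
      have hl' : l' ≠ [] := by
        intro h'; subst h'; exact absurd h.symm.nil_eq (by simp)
      have h1 : pvMax (x :: xs) ≤ pvMax l' := le_pvMax (h.mem_iff.mp (pvMax_mem hl))
      have h2 : pvMax l' ≤ pvMax (x :: xs) := le_pvMax (h.mem_iff.mpr (pvMax_mem hl'))
      omega

lemma pv_foldl_max_sub (rs : List Int) : ∀ r : Int,
    (rs.map (fun x => x - 1)).foldl max (r - 1) = rs.foldl max r - 1 := by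
  induction rs with
  | nil => intro r; simp
  | cons b t ih =>
      intro r
      simp only [List.map_cons, List.foldl_cons]
      rw [max_sub_sub_right, ih]

lemma pv_foldl_min_sub (rs : List Int) : ∀ r : Int,
    (rs.map (fun x => x - 1)).foldl min (r - 1) = rs.foldl min r - 1 := by
  induction rs with
  | nil => intro r; simp
  | cons b t ih =>
      intro r
      simp only [List.map_cons, List.foldl_cons]
      rw [min_sub_sub_right, ih]

lemma pvMax_map_sub {l : List Int} (h : l ≠ []) :
    pvMax (l.map (fun x => x - 1)) = pvMax l - 1 := by
  cases l with
  | nil => exact absurd rfl h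
  | cons x xs => simpa [pvMax] using pv_foldl_max_sub xs x

lemma pvMin_shift (l : List Int) :
    pvMin (l.map (fun x => x - 1)) = (pvMin l).map (fun m => m - 1) := by
  cases l with
  | nil => rfl
  | cons x xs => simpa [pvMin] using pv_foldl_min_sub xs x

lemma pv_count_shift (l : List Int) (m : Int) :
    (l.map (fun x => x - 1)).count (m - 1) = l.count m := by
  induction l with
  | nil => rfl
  | cons x xs ih =>
      simp only [List.map_cons, List.count_cons, ih]
      by_cases hx : x = m
      · simp [hx]
      · have : ¬ (x - 1 = m - 1) := by omega
        simp [hx, this]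

lemma pv_filter_shift (l : List Int) (m : Int) :
    (l.map (fun x => x - 1)).filter (fun x => x ≠ m - 1) =
      (l.filter (fun x => x ≠ m)).map (fun x => x - 1) := by
  induction l with
  | nil => rfl
  | cons x xs ih =>
      simp only [List.map_cons, List.filter_cons]
      by_cases hx : x = m
      · have h1 : (decide (x - 1 ≠ m - 1)) = false := by simp; omega
        have h2 : (decide (x ≠ m)) = false := by simp [hx]
        rw [h1, h2, ih]
        simp
      · have h1 : (decide (x - 1 ≠ m - 1)) = true := by simp; omega
        have h2 : (decide (x ≠ m)) = true := by simp [hx]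
        rw [h1, h2, ih]
        simp

----------------------------------------------------------------
-- unfolding lemmas for pvSched / pvFeasible
----------------------------------------------------------------

lemma pvSched_nil (t : List Int) : pvSched t [] = t := by rw [pvSched.eq_def]

lemma pvSched_step (t : List Int) {q : List Int} (hq : q ≠ []) {m : Int} (hm : pvMin t = some m) :
    pvSched t q = pvSched (t.filter (fun x => x ≠ m) ++ (q.take (t.count m)).map (fun p => m + p))
      (q.drop (t.count m)) := by
  cases q with
  | nil => exact absurd rfl hq
  | cons a as =>
      rw [pvSched.eq_def]
      split
      · next heq => exact absurd heq (by simp)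
      · split
        · next heq2 => rw [hm] at heq2; cases heq2
        · next m2 heq2 => rw [hm] at heq2; cases heq2; rfl

lemma pvSched_empty (q : List Int) : pvSched [] q = [] := by
  cases q with
  | nil => exact pvSched_nil []
  | cons a as =>
      rw [pvSched.eq_def]
      split
      · rfl
      · split
        · rfl
        · next m2 heq2 => simp [pvMin] at heq2

lemma pvFeasible_nil (t : List Int) : pvFeasible t [] = true := rfl

lemma pvFeasibleF_congr : ∀ (n n' : Nat) (t q : List Int), q.length ≤ n → q.length ≤ n' →
    pvFeasibleF n t q = pvFeasibleF n' t q := by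
  intro n
  induction n with
  | zero =>
      intro n' t q hq _
      have : q = [] := List.eq_nil_of_length_eq_zero (by omega)
      subst this
      cases n' <;> rfl
  | succ n ih =>
      intro n' t q hq hq'
      cases q with
      | nil => cases n' <;> rfl
      | cons a as =>
          cases n' with
          | zero => simp at hq'
          | succ n'' =>
              cases hm : pvMin t with
              | none => simp only [pvFeasibleF, hm]
              | some m =>
                  have hc : 1 ≤ t.count m := List.count_pos_iff.mpr (pvMin_mem hm)
                  simp only [pvFeasibleF, hm]
                  congr 1
                  apply ih
                  · simp only [List.length_drop, List.length_cons] at hq ⊢; omega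
                  · simp only [List.length_drop, List.length_cons] at hq' ⊢; omega

lemma pvFeasible_step (t : List Int) {q : List Int} (hq : q ≠ []) {m : Int} (hm : pvMin t = some m) :
    pvFeasible t q =
      (decide (t.count m ≤ q.length) &&
        pvFeasible (t.filter (fun x => x ≠ m) ++ (q.take (t.count m)).map (fun p => m + p))
          (q.drop (t.count m))) := by
  cases q with
  | nil => exact absurd rfl hq
  | cons a as =>
      have hc : 1 ≤ t.count m := List.count_pos_iff.mpr (pvMin_mem hm)
      show pvFeasibleF (as.length + 1) t (a :: as) = _
      simp only [pvFeasibleF, hm]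
      congr 1
      apply pvFeasibleF_congr
      · simp only [List.length_drop, List.length_cons]; omega
      · exact le_rfl

----------------------------------------------------------------
-- structural facts about pvSched / pvFeasible (strong induction on queue length)
----------------------------------------------------------------

lemma pvSched_perm : ∀ (n : Nat) (q t t' : List Int), q.length ≤ n → t.Perm t' →
    (pvSched t q).Perm (pvSched t' q) := by
  intro n
  induction n with
  | zero =>
      intro q t t' hq h
      have : q = [] := List.eq_nil_of_length_eq_zero (by omega)
      subst this
      simpa [pvSched_nil] using h
  | succ n ih =>
      intro q t t' hq h
      cases hqq : q with
      | nil => simpa [pvSched_nil] using h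
      | cons a as =>
          subst hqq
          cases hm : pvMin t with
          | none =>
              have ht : t = [] := by cases t with | nil => rfl | cons x xs => simp [pvMin] at hm
              subst ht
              have ht' : t' = [] := h.nil_eq.symm
              subst ht'
              exact List.Perm.refl _
          | some m =>
              have hm' : pvMin t' = some m := by rw [← pvMin_perm h, hm]
              have hcnt : t.count m = t'.count m := h.count_eq m
              have hc : 1 ≤ t.count m := List.count_pos_iff.mpr (pvMin_mem hm)
              rw [pvSched_step t (by simp) hm, pvSched_step t' (by simp) hm', ← hcnt]
              apply ih
              · simp only [List.length_drop, List.length_cons] at hq ⊢; omega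
              · exact (h.filter _).append (List.Perm.refl _)

lemma pvFeasible_perm : ∀ (n : Nat) (q t t' : List Int), q.length ≤ n → t.Perm t' →
    pvFeasible t q = pvFeasible t' q := by
  intro n
  induction n with
  | zero =>
      intro q t t' hq h
      have : q = [] := List.eq_nil_of_length_eq_zero (by omega)
      subst this
      simp [pvFeasible_nil]
  | succ n ih =>
      intro q t t' hq h
      cases hqq : q with
      | nil => simp [pvFeasible_nil]
      | cons a as =>
          subst hqq
          cases hm : pvMin t with
          | none =>
              have ht : t = [] := by cases t with | nil => rfl | cons x xs => simp [pvMin] at hm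
              subst ht
              have ht' : t' = [] := h.nil_eq.symm
              subst ht'
              rfl
          | some m =>
              have hm' : pvMin t' = some m := by rw [← pvMin_perm h, hm]
              have hcnt : t.count m = t'.count m := h.count_eq m
              have hc : 1 ≤ t.count m := List.count_pos_iff.mpr (pvMin_mem hm)
              rw [pvFeasible_step t (by simp) hm, pvFeasible_step t' (by simp) hm', ← hcnt]
              congr 1
              apply ih
              · simp only [List.length_drop, List.length_cons] at hq ⊢; omega
              · exact (h.filter _).append (List.Perm.refl _)

lemma pvSched_shift : ∀ (n : Nat) (q t : List Int), q.length ≤ n →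
    pvSched (t.map (fun x => x - 1)) q = (pvSched t q).map (fun x => x - 1) := by
  intro n
  induction n with
  | zero =>
      intro q t hq
      have : q = [] := List.eq_nil_of_length_eq_zero (by omega)
      subst this
      simp [pvSched_nil]
  | succ n ih =>
      intro q t hq
      cases hqq : q with
      | nil => simp [pvSched_nil]
      | cons a as =>
          subst hqq
          cases hm : pvMin t with
          | none =>
              have ht : t = [] := by cases t with | nil => rfl | cons x xs => simp [pvMin] at hm
              subst ht
              simp [pvSched_empty]
          | some m =>
              have hm' : pvMin (t.map (fun x => x - 1)) = some (m - 1) := by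
                rw [pvMin_shift, hm]; rfl
              have hc : 1 ≤ t.count m := List.count_pos_iff.mpr (pvMin_mem hm)
              rw [pvSched_step t (by simp) hm, pvSched_step _ (by simp) hm',
                pv_count_shift, pv_filter_shift]
              have hmap : ((a :: as).take (t.count m)).map (fun p => m - 1 + p) =
                  (((a :: as).take (t.count m)).map (fun p => m + p)).map (fun x => x - 1) := by
                simp only [List.map_map]
                apply List.map_congr_left
                intro x _
                simp only [Function.comp_apply]
                omega
              rw [hmap, ← List.map_append]
              apply ih
              simp only [List.length_drop, List.length_cons] at hq ⊢; omega

lemma pvFeasible_shift : ∀ (n : Nat) (q t : List Int), q.length ≤ n →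
    pvFeasible (t.map (fun x => x - 1)) q = pvFeasible t q := by
  intro n
  induction n with
  | zero =>
      intro q t hq
      have : q = [] := List.eq_nil_of_length_eq_zero (by omega)
      subst this
      simp [pvFeasible_nil]
  | succ n ih =>
      intro q t hq
      cases hqq : q with
      | nil => simp [pvFeasible_nil]
      | cons a as =>
          subst hqq
          cases hm : pvMin t with
          | none =>
              have ht : t = [] := by cases t with | nil => rfl | cons x xs => simp [pvMin] at hm
              subst ht
              simp
          | some m =>
              have hm' : pvMin (t.map (fun x => x - 1)) = some (m - 1) := by
                rw [pvMin_shift, hm]; rfl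
              have hc : 1 ≤ t.count m := List.count_pos_iff.mpr (pvMin_mem hm)
              rw [pvFeasible_step t (by simp) hm, pvFeasible_step _ (by simp) hm',
                pv_count_shift, pv_filter_shift]
              congr 1
              have hmap : ((a :: as).take (t.count m)).map (fun p => m - 1 + p) =
                  (((a :: as).take (t.count m)).map (fun p => m + p)).map (fun x => x - 1) := by
                simp only [List.map_map]
                apply List.map_congr_left
                intro x _
                simp only [Function.comp_apply]
                omega
              rw [hmap, ← List.map_append]
              apply ih
              simp only [List.length_drop, List.length_cons] at hq ⊢; omega

lemma pvSched_ne_nil : ∀ (n : Nat) (q t : List Int), q.length ≤ n → t ≠ [] →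
    pvSched t q ≠ [] := by
  intro n
  induction n with
  | zero =>
      intro q t hq ht
      have : q = [] := List.eq_nil_of_length_eq_zero (by omega)
      subst this
      simpa [pvSched_nil] using ht
  | succ n ih =>
      intro q t hq ht
      cases hqq : q with
      | nil => simpa [pvSched_nil] using ht
      | cons a as =>
          subst hqq
          cases hm : pvMin t with
          | none =>
              have : t = [] := by cases t with | nil => rfl | cons x xs => simp [pvMin] at hm
              exact absurd this ht
          | some m =>
              have hc : 1 ≤ t.count m := List.count_pos_iff.mpr (pvMin_mem hm)
              rw [pvSched_step t (by simp) hm]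
              apply ih
              · simp only [List.length_drop, List.length_cons] at hq ⊢; omega
              · have : (a :: as).take (t.count m) ≠ [] := by
                  cases hcm : t.count m with
                  | zero => omega
                  | succ d => simp [List.take_succ_cons]
                intro hcontra
                rcases List.append_eq_nil_iff.mp hcontra with ⟨-, h2⟩
                exact this (List.map_eq_nil_iff.mp h2)

lemma pvSched_nonneg : ∀ (n : Nat) (q t : List Int), q.length ≤ n →
    (∀ x ∈ t, 0 ≤ x) → (∀ x ∈ q, 1 ≤ x) → ∀ x ∈ pvSched t q, 0 ≤ x := by
  intro n
  induction n with
  | zero =>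
      intro q t hq ht _
      have : q = [] := List.eq_nil_of_length_eq_zero (by omega)
      subst this
      simpa [pvSched_nil] using ht
  | succ n ih =>
      intro q t hq ht hq1
      cases hqq : q with
      | nil => simpa [pvSched_nil] using ht
      | cons a as =>
          subst hqq
          cases hm : pvMin t with
          | none =>
              have h0 : t = [] := by cases t with | nil => rfl | cons x xs => simp [pvMin] at hm
              subst h0
              simp [pvSched_empty]
          | some m =>
              have hc : 1 ≤ t.count m := List.count_pos_iff.mpr (pvMin_mem hm)
              rw [pvSched_step t (by simp) hm]
              apply ih
              · simp only [List.length_drop, List.length_cons] at hq ⊢; omega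
              · intro x hx
                rcases List.mem_append.mp hx with hx | hx
                · exact ht x (List.mem_of_mem_filter hx)
                · rcases List.mem_map.mp hx with ⟨p, hp, rfl⟩
                  have h1 : 1 ≤ p := hq1 p (List.mem_of_mem_take hp)
                  have h2 : 0 ≤ m := ht m (pvMin_mem hm)
                  omega
              · intro x hx
                exact hq1 x (List.mem_of_mem_drop hx)

lemma pvSched_bound : ∀ (n : Nat) (q t : List Int), q.length ≤ n → t ≠ [] →
    (∀ x ∈ t, 0 ≤ x) → (∀ x ∈ q, 1 ≤ x) →
    pvMax (pvSched t q) ≤ pvMax t + q.sum := by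
  intro n
  induction n with
  | zero =>
      intro q t hq ht _ _
      have : q = [] := List.eq_nil_of_length_eq_zero (by omega)
      subst this
      simp [pvSched_nil]
  | succ n ih =>
      intro q t hq ht ht0 hq1
      cases hqq : q with
      | nil => simp [pvSched_nil]
      | cons a as =>
          subst hqq
          cases hm : pvMin t with
          | none =>
              have h0 : t = [] := by cases t with | nil => rfl | cons x xs => simp [pvMin] at hm
              exact absurd h0 ht
          | some m =>
              have hc : 1 ≤ t.count m := List.count_pos_iff.mpr (pvMin_mem hm)
              rw [pvSched_step t (by simp) hm]
              set c := t.count m with hcdef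
              set t1 := t.filter (fun x => x ≠ m) ++ ((a :: as).take c).map (fun p => m + p) with ht1
              have htake1 : ∀ x ∈ (a :: as).take c, 1 ≤ x := fun x hx => hq1 x (List.mem_of_mem_take hx)
              have htakesum : 0 ≤ ((a :: as).take c).sum := List.sum_nonneg (fun x hx => by
                have := htake1 x hx; omega)
              have ht1ne : t1 ≠ [] := by
                have : (a :: as).take c ≠ [] := by
                  cases hcm : c with
                  | zero => omega
                  | succ d => simp [List.take_succ_cons]
                intro hcontra
                rcases List.append_eq_nil_iff.mp hcontra with ⟨-, h2⟩
                exact this (List.map_eq_nil_iff.mp h2)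
              have ht10 : ∀ x ∈ t1, 0 ≤ x := by
                intro x hx
                rcases List.mem_append.mp hx with hx | hx
                · exact ht0 x (List.mem_of_mem_filter hx)
                · rcases List.mem_map.mp hx with ⟨p, hp, rfl⟩
                  have h1 := htake1 p hp
                  have h2 : 0 ≤ m := ht0 m (pvMin_mem hm)
                  omega
              have hmax1 : pvMax t1 ≤ pvMax t + ((a :: as).take c).sum := by
                have hmem0 : pvMax t1 ∈ t1 := pvMax_mem ht1ne
                have hmem : pvMax t1 ∈ t.filter (fun x => x ≠ m) ++ ((a :: as).take c).map (fun p => m + p) := by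
                  rw [← ht1]; exact hmem0
                rcases List.mem_append.mp hmem with hx | hx
                · have : pvMax t1 ≤ pvMax t := le_pvMax (List.mem_of_mem_filter hx)
                  omega
                · rcases List.mem_map.mp hx with ⟨p, hp, hpe⟩
                  have h1 : m ≤ pvMax t := le_pvMax (pvMin_mem hm)
                  have h2 : p ≤ ((a :: as).take c).sum :=
                    List.single_le_sum (fun x hx => by have := htake1 x hx; omega) p hp
                  omega
              have hdropsum : ((a :: as).drop c).sum = (a :: as).sum - ((a :: as).take c).sum := by
                have := List.sum_take_add_sum_drop (a :: as) c
                omega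
              have := ih ((a :: as).drop c) t1
                (by simp only [List.length_drop, List.length_cons] at hq ⊢; omega)
                ht1ne ht10 (fun x hx => hq1 x (List.mem_of_mem_drop hx))
              omega

----------------------------------------------------------------
-- A side: refill as a multiset operation; the loop computes the schedule's makespan
----------------------------------------------------------------

lemma pvRefill_spec : ∀ (regs que : List Int), regs.count 0 ≤ que.length →
    (pvRefill regs que).1.Perm (regs.filter (fun x => x ≠ 0) ++ que.take (regs.count 0)) ∧
      (pvRefill regs que).2 = que.drop (regs.count 0) := by
  intro regs
  induction regs with
  | nil => intro que h; simp [pvRefill]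
  | cons x xs ih =>
      intro que h
      by_cases hx : x = 0
      · subst hx
        have hcnt : (0 :: xs).count (0 : Int) = xs.count 0 + 1 := by simp
        rw [hcnt] at h ⊢
        cases que with
        | nil => simp at h
        | cons q qs =>
            have h' : xs.count 0 ≤ qs.length := by simp at h; omega
            obtain ⟨ih1, ih2⟩ := ih qs h'
            constructor
            · show (q :: (pvRefill xs qs).1).Perm _
              have step1 : (q :: (pvRefill xs qs).1).Perm
                  (q :: (xs.filter (fun x => x ≠ 0) ++ qs.take (xs.count 0))) := ih1.cons q
              apply step1.trans
              have hfilter : (0 :: xs).filter (fun x => x ≠ 0) = xs.filter (fun x => x ≠ 0) := by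
                simp
              have htake : (q :: qs).take (xs.count 0 + 1) = q :: qs.take (xs.count 0) := by
                simp [List.take_succ_cons]
              rw [hfilter, htake]
              exact List.perm_middle.symm
            · show (pvRefill xs qs).2 = _
              rw [ih2]
              simp [List.drop_succ_cons]
      · have hcnt : (x :: xs).count (0 : Int) = xs.count 0 := by simp [List.count_cons, hx]
        rw [hcnt] at h ⊢
        obtain ⟨ih1, ih2⟩ := ih que h
        have hfilter : (x :: xs).filter (fun x => x ≠ 0) = x :: xs.filter (fun x => x ≠ 0) := by
          simp [List.filter_cons, hx]
        constructor
        · show (if x ≠ 0 then _ else _ : List Int × List Int).1.Perm _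
          rw [if_pos hx]
          rw [hfilter]
          exact ih1.cons x
        · show (if x ≠ 0 then _ else _ : List Int × List Int).2 = _
          rw [if_pos hx]
          exact ih2

lemma pv_loopA_no_que : ∀ (fuel : Nat) (r : Int) (rs : List Int) (time : Int),
    0 ≤ rs.foldl max r → (rs.foldl max r).toNat < fuel →
    pvLoopA fuel (r :: rs) [] time = time + rs.foldl max r := by
  intro fuel
  induction fuel with
  | zero => intro r rs time _ h; omega
  | succ n ih =>
      intro r rs time hM hfuel
      rw [pvLoopA]
      rw [PySem.List.max?_id_cons]
      by_cases h0 : rs.foldl max r = 0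
      · simp [h0]
      · have hcond : ((some (rs.foldl max r)).getD 0 ≠ 0) ∨ ([] : List Int) ≠ [] := by
          simp [h0]
        rw [if_pos hcond, if_neg (by simp)]
        simp only [List.map_cons]
        rw [ih (r - 1) (rs.map (fun x => x - 1)) (time + 1)
            (by rw [pv_foldl_max_sub]; omega)
            (by rw [pv_foldl_max_sub]; omega)]
        rw [pv_foldl_max_sub]; ring

-- the main A-side lemma: the tick loop returns the makespan of the greedy schedule
lemma pvLoopA_main : ∀ (fuel : Nat) (regs que : List Int) (time : Int),
    regs ≠ [] → (∀ x ∈ regs, 0 ≤ x) → (∀ x ∈ que, 1 ≤ x) →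
    pvFeasible regs que = true → (pvMax (pvSched regs que)).toNat < fuel →
    pvLoopA fuel regs que time = time + pvMax (pvSched regs que) := by
  intro fuel
  induction fuel with
  | zero => intro regs que time _ _ _ _ h; omega
  | succ n ih =>
      intro regs que time hne h0 hq1 hfeas hfuel
      cases hq : que with
      | nil =>
          subst hq
          obtain ⟨r, rs, rfl⟩ : ∃ r rs, regs = r :: rs := by
            cases regs with
            | nil => exact absurd rfl hne
            | cons r rs => exact ⟨r, rs, rfl⟩
          have hM0 : 0 ≤ rs.foldl max r := by
            have : r ≤ rs.foldl max r := (PySem.List.le_foldl_max rs r).1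
            have := h0 r (by simp)
            omega
          rw [pvSched_nil] at hfuel ⊢
          exact pv_loopA_no_que _ r rs time hM0 hfuel
      | cons a as =>
          subst hq
          rw [pvLoopA]
          rw [if_pos (Or.inr (by simp))]
          by_cases hz : (0 : Int) ∈ regs
          · -- refill branch
            have hcontains : regs.contains 0 = true := by
              simpa [List.contains_iff_mem] using hz
            rw [if_pos ⟨by simpa using hcontains, by simp⟩]
            show pvLoopA n ((pvRefill regs (a :: as)).1.map (fun x => x - 1))
              (pvRefill regs (a :: as)).2 (time + 1) = time + pvMax (pvSched regs (a :: as))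
            have hm : pvMin regs = some 0 := pvMin_eq_some hz h0
            set c := regs.count (0 : Int) with hcdef
            have hc1 : 1 ≤ c := List.count_pos_iff.mpr hz
            -- feasibility unfolds: c ≤ |que| and the next state is feasible
            have hfeas' := hfeas
            rw [pvFeasible_step regs (by simp) hm] at hfeas'
            rw [Bool.and_eq_true, decide_eq_true_iff] at hfeas'
            obtain ⟨hcle, hfeasnext⟩ := hfeas'
            -- the canonical next multiset X (before the tick's decrement)
            set X := regs.filter (fun x => x ≠ 0) ++ (a :: as).take c with hX
            have hmapX : ((a :: as).take c).map (fun p => (0 : Int) + p) = (a :: as).take c := by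
              simp
            have hfeasX : pvFeasible X ((a :: as).drop c) = true := by
              rw [hX, ← hmapX]; exact hfeasnext
            have hschedX : pvSched regs (a :: as) = pvSched X ((a :: as).drop c) := by
              rw [pvSched_step regs (by simp) hm, ← hcdef, hX, hmapX]
            obtain ⟨hperm, hsnd⟩ := pvRefill_spec regs (a :: as) hcle
            -- new state after this tick
            set regs2 := (pvRefill regs (a :: as)).1.map (fun x => x - 1) with hregs2
            have hperm2 : regs2.Perm (X.map (fun x => x - 1)) := hperm.map _
            have hXne : X ≠ [] := by
              have : (a :: as).take c ≠ [] := by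
                cases hcm : c with
                | zero => omega
                | succ d => simp [List.take_succ_cons]
              intro hcontra
              rcases List.append_eq_nil_iff.mp hcontra with ⟨-, h2⟩
              exact this h2
            have hX1 : ∀ x ∈ X, 1 ≤ x := by
              intro x hx
              rcases List.mem_append.mp hx with hx | hx
              · have h1 := h0 x (List.mem_of_mem_filter hx)
                have h2 := (List.mem_filter.mp hx).2
                simp at h2
                omega
              · exact hq1 x (List.mem_of_mem_take hx)
            have hregs2ne : regs2 ≠ [] := by
              intro h
              rw [h] at hperm2
              exact hXne (List.map_eq_nil_iff.mp hperm2.nil_eq.symm)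
            have hregs20 : ∀ x ∈ regs2, 0 ≤ x := by
              intro x hx
              have := hperm2.mem_iff.mp hx
              rcases List.mem_map.mp this with ⟨y, hy, rfl⟩
              have := hX1 y hy
              omega
            have hq1' : ∀ x ∈ (a :: as).drop c, 1 ≤ x := fun x hx => hq1 x (List.mem_of_mem_drop hx)
            have hfeas2 : pvFeasible regs2 ((a :: as).drop c) = true := by
              rw [pvFeasible_perm ((a :: as).drop c).length _ _ _ le_rfl hperm2,
                pvFeasible_shift ((a :: as).drop c).length _ _ le_rfl]
              exact hfeasX
            have hsched2 : pvMax (pvSched regs2 ((a :: as).drop c)) =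
                pvMax (pvSched regs (a :: as)) - 1 := by
              have p1 : (pvSched regs2 ((a :: as).drop c)).Perm
                  (pvSched (X.map (fun x => x - 1)) ((a :: as).drop c)) :=
                pvSched_perm ((a :: as).drop c).length _ _ _ le_rfl hperm2
              have p2 : pvSched (X.map (fun x => x - 1)) ((a :: as).drop c) =
                  (pvSched X ((a :: as).drop c)).map (fun x => x - 1) :=
                pvSched_shift ((a :: as).drop c).length _ _ le_rfl
              have p3 : pvSched X ((a :: as).drop c) ≠ [] :=
                pvSched_ne_nil ((a :: as).drop c).length _ _ le_rfl hXne
              rw [pvMax_perm p1, p2, pvMax_map_sub p3, hschedX]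
            have hM1 : 1 ≤ pvMax (pvSched regs (a :: as)) := by
              have hne2 : pvSched regs2 ((a :: as).drop c) ≠ [] :=
                pvSched_ne_nil ((a :: as).drop c).length _ _ le_rfl hregs2ne
              have hnn : 0 ≤ pvMax (pvSched regs2 ((a :: as).drop c)) := by
                have := pvSched_nonneg ((a :: as).drop c).length ((a :: as).drop c) regs2
                  le_rfl hregs20 hq1' _ (pvMax_mem hne2)
                exact this
              omega
            have := ih regs2 ((a :: as).drop c) (time + 1) hregs2ne hregs20 hq1' hfeas2
              (by rw [hsched2]; omega)
            rw [hsnd] at *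
            rw [this, hsched2]
            ring
          · -- no cashier is free: plain decrement
            have hcontains : ¬ (regs.contains 0 = true ∧ (a :: as) ≠ []) := by
              intro ⟨h1, _⟩
              exact hz (by simpa [List.contains_iff_mem] using h1)
            rw [if_neg (by simpa using hcontains)]
            show pvLoopA n (regs.map (fun x => x - 1)) (a :: as) (time + 1) =
              time + pvMax (pvSched regs (a :: as))
            set regs2 := regs.map (fun x => x - 1) with hregs2
            have hregs21 : ∀ x ∈ regs, 1 ≤ x := by
              intro x hx
              have := h0 x hx
              rcases eq_or_lt_of_le this with h | h
              · exact absurd (h ▸ hx) hz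
              · omega
            have hregs2ne : regs2 ≠ [] := by
              intro h
              exact hne (List.map_eq_nil_iff.mp h)
            have hregs20 : ∀ x ∈ regs2, 0 ≤ x := by
              intro x hx
              rcases List.mem_map.mp hx with ⟨y, hy, rfl⟩
              have := hregs21 y hy
              omega
            have hfeas2 : pvFeasible regs2 (a :: as) = true := by
              rw [pvFeasible_shift (a :: as).length _ _ le_rfl]
              exact hfeas
            have hsched2 : pvMax (pvSched regs2 (a :: as)) =
                pvMax (pvSched regs (a :: as)) - 1 := by
              rw [pvSched_shift (a :: as).length _ _ le_rfl,
                pvMax_map_sub (pvSched_ne_nil (a :: as).length _ _ le_rfl hne)]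
            have hM1 : 1 ≤ pvMax (pvSched regs (a :: as)) := by
              have hne2 : pvSched regs2 (a :: as) ≠ [] :=
                pvSched_ne_nil (a :: as).length _ _ le_rfl hregs2ne
              have hnn : 0 ≤ pvMax (pvSched regs2 (a :: as)) :=
                pvSched_nonneg (a :: as).length (a :: as) regs2 le_rfl hregs20 hq1 _
                  (pvMax_mem hne2)
              omega
            have := ih regs2 (a :: as) (time + 1) hregs2ne hregs20 hq1 hfeas2
              (by rw [hsched2]; omega)
            rw [this, hsched2]
            ring

----------------------------------------------------------------
-- B side: the per-customer fold computes the same schedule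
----------------------------------------------------------------

lemma pv_set_mid (pre suf : List Int) (v p : Int) :
    (pre ++ v :: suf).set pre.length p = pre ++ p :: suf := by
  induction pre with
  | nil => simp
  | cons x t ih => simp [List.set_cons_succ, ih]

-- pvAssign replaces the first occurrence of the minimum m by m + j
lemma pvAssign_decomp (f : List Int) (j : Int) (hf : f ≠ []) :
    ∃ m pre suf, pvMin f = some m ∧ f = pre ++ m :: suf ∧
      pvAssign f j = pre ++ (m + j) :: suf := by
  obtain ⟨m, hm⟩ : ∃ m, PySem.List.min? f (fun y => y) = some m := by
    cases h : PySem.List.min? f (fun y => y) with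
    | none => exact absurd ((PySem.List.min?_eq_none_iff _ _).mp h) hf
    | some m => exact ⟨m, rfl⟩
  have hmmem : m ∈ f := PySem.List.min?_mem hm
  have hmle : ∀ x ∈ f, m ≤ x := fun x hx => PySem.List.min?_isMin hm x hx
  obtain ⟨jdx, hj⟩ : ∃ jdx, PySem.List.index? f m = some jdx := by
    cases h : PySem.List.index? f m with
    | none => exact absurd ((PySem.List.index?_eq_none_iff _ _).mp h) (by simp [hmmem])
    | some jdx => exact ⟨jdx, rfl⟩
  obtain ⟨pre, suf, hfeq, hjlen, -⟩ := (PySem.List.index?_eq_some_iff f m jdx).mp hj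
  refine ⟨m, pre, suf, pvMin_eq_some hmmem hmle, hfeq, ?_⟩
  have hget : f[jdx]? = some m := by
    subst hfeq; subst hjlen
    rw [List.getElem?_append_right (le_refl _)]
    simp
  simp only [pvAssign, hm, hj, hget, Option.getD_some]
  subst hfeq; subst hjlen
  exact pv_set_mid pre suf m (m + j)

-- one customer commutes with one scheduling event (and keeps the schedule feasible)
lemma pvOneStep (t : List Int) (j : Int) (rest : List Int) (ht : t ≠ []) (hj : 1 ≤ j)
    (hfeas : pvFeasible t (j :: rest) = true) :
    (pvSched t (j :: rest)).Perm (pvSched (pvAssign t j) rest) ∧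
      pvFeasible (pvAssign t j) rest = true := by
  obtain ⟨m, pre, suf, hm, hfeq, hassign⟩ := pvAssign_decomp t j ht
  have hmle : ∀ x ∈ t, m ≤ x := pvMin_le hm
  set c := t.count m with hcdef
  have hc1 : 1 ≤ c := List.count_pos_iff.mpr (pvMin_mem hm)
  have hcount_split : c = pre.count m + suf.count m + 1 := by
    rw [hcdef, hfeq]
    simp [List.count_append, List.count_cons]
    omega
  have hmj : m + j ≠ m := by omega
  have hfilter_t : t.filter (fun x => x ≠ m) =
      pre.filter (fun x => x ≠ m) ++ suf.filter (fun x => x ≠ m) := by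
    rw [hfeq]
    simp [List.filter_append, List.filter_cons]
  have hfilter_t' : (pre ++ (m + j) :: suf).filter (fun x => x ≠ m) =
      pre.filter (fun x => x ≠ m) ++ (m + j) :: suf.filter (fun x => x ≠ m) := by
    simp [List.filter_append, List.filter_cons, hmj]
  have hfeas' := hfeas
  rw [pvFeasible_step t (by simp) hm, ← hcdef, Bool.and_eq_true, decide_eq_true_iff] at hfeas'
  obtain ⟨hcle, hfeasnext⟩ := hfeas'
  by_cases hc : c = 1
  · -- unique minimum: the event consumes exactly this customer
    have hpre0 : pre.count m = 0 := by omega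
    have hsuf0 : suf.count m = 0 := by omega
    have hfp : pre.filter (fun x => x ≠ m) = pre :=
      List.filter_eq_self.mpr (fun x hx => by
        simp only [ne_eq, decide_eq_true_eq]
        intro hxm
        exact absurd (List.count_pos_iff.mpr (hxm ▸ hx)) (by omega))
    have hfs : suf.filter (fun x => x ≠ m) = suf :=
      List.filter_eq_self.mpr (fun x hx => by
        simp only [ne_eq, decide_eq_true_eq]
        intro hxm
        exact absurd (List.count_pos_iff.mpr (hxm ▸ hx)) (by omega))
    have hpermA : (pvAssign t j).Perm
        (t.filter (fun x => x ≠ m) ++ ((j :: rest).take c).map (fun p => m + p)) := by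
      rw [hassign, hfilter_t, hfp, hfs, hc]
      simp only [List.take_succ_cons, List.take_zero, List.map_cons, List.map_nil]
      exact List.perm_middle.trans (List.perm_append_singleton _ _).symm
    have hq1 : (j :: rest).drop c = rest := by rw [hc, List.drop_succ_cons, List.drop_zero]
    constructor
    · rw [pvSched_step t (by simp) hm, ← hcdef, hq1]
      exact pvSched_perm rest.length _ _ _ le_rfl hpermA.symm
    · rw [pvFeasible_perm rest.length _ _ _ le_rfl hpermA]
      rw [hq1] at hfeasnext
      exact hfeasnext
  · -- several cashiers share the minimum: the event also consumes later customers
    have hc2 : 2 ≤ c := by omega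
    obtain ⟨d, hd⟩ : ∃ d, c = d + 1 := ⟨c - 1, by omega⟩
    have hd1 : 1 ≤ d := by omega
    have hdle : d ≤ rest.length := by
      simp only [List.length_cons] at hcle; omega
    have hrest : rest ≠ [] := by
      intro h; rw [h] at hdle; simp at hdle; omega
    have ht' : pvMin (pre ++ (m + j) :: suf) = some m := by
      apply pvMin_eq_some
      · have hps : 1 ≤ pre.count m + suf.count m := by omega
        rcases Nat.lt_or_ge 0 (pre.count m) with h | h
        · exact List.mem_append.mpr (Or.inl (List.count_pos_iff.mp h))
        · have : 0 < suf.count m := by omega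
          exact List.mem_append.mpr (Or.inr (List.mem_cons.mpr (Or.inr (List.count_pos_iff.mp this))))
      · intro x hx
        rcases List.mem_append.mp hx with hx | hx
        · exact hmle x (hfeq ▸ List.mem_append.mpr (Or.inl hx))
        · rcases List.mem_cons.mp hx with rfl | hx
          · omega
          · exact hmle x (hfeq ▸ List.mem_append.mpr (Or.inr (List.mem_cons.mpr (Or.inr hx))))
    have hcnt' : (pre ++ (m + j) :: suf).count m = d := by
      simp only [List.count_append, List.count_cons]
      have h1 : ((m + j) == m) = false := by simp [hmj]
      rw [h1]
      simp only [Bool.false_eq_true, if_false]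
      omega
    have hperm12 :
        (t.filter (fun x => x ≠ m) ++ ((j :: rest).take c).map (fun p => m + p)).Perm
          ((pre ++ (m + j) :: suf).filter (fun x => x ≠ m) ++ (rest.take d).map (fun p => m + p)) := by
      rw [hfilter_t, hfilter_t', hd]
      simp only [List.take_succ_cons, List.map_cons]
      apply List.perm_iff_count.mpr
      intro x
      simp only [List.count_append, List.count_cons]
      omega
    have hqeq : (j :: rest).drop c = rest.drop d := by rw [hd, List.drop_succ_cons]
    constructor
    · rw [pvSched_step t (by simp) hm, ← hcdef, hassign,
        pvSched_step (pre ++ (m + j) :: suf) hrest ht', hcnt', hqeq]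
      exact pvSched_perm _ _ _ _ le_rfl hperm12
    · rw [hassign, pvFeasible_step (pre ++ (m + j) :: suf) hrest ht', hcnt',
        Bool.and_eq_true, decide_eq_true_iff]
      refine ⟨hdle, ?_⟩
      rw [← pvFeasible_perm (rest.drop d).length _ _ _ le_rfl hperm12]
      rw [hqeq] at hfeasnext
      exact hfeasnext

-- the per-customer fold realises the greedy schedule (as a multiset of finish times)
lemma pvB_fold : ∀ (jobs t : List Int), t ≠ [] → (∀ j ∈ jobs, 1 ≤ j) →
    pvFeasible t jobs = true → (jobs.foldl pvAssign t).Perm (pvSched t jobs) := by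
  intro jobs
  induction jobs with
  | nil => intro t ht _ _; rw [pvSched_nil]; simp
  | cons j rest ih =>
      intro t ht hj hfeas
      obtain ⟨m, pre, suf, -, -, hassign⟩ := pvAssign_decomp t j (by exact ht)
      have ht' : pvAssign t j ≠ [] := by rw [hassign]; simp
      obtain ⟨hstep, hfeas'⟩ := pvOneStep t j rest ht (hj j (by simp)) hfeas
      have hrest1 : ∀ x ∈ rest, 1 ≤ x := fun x hx => hj x (by simp [hx])
      have := ih (pvAssign t j) ht' hrest1 hfeas'
      simpa only [List.foldl_cons] using this.trans hstep.symm

----------------------------------------------------------------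
-- assembly
----------------------------------------------------------------

lemma pvMax_getD {l : List Int} (h : l ≠ []) :
    (PySem.List.max? l (fun y => y)).getD 0 = pvMax l := by
  cases l with
  | nil => exact absurd rfl h
  | cons x xs => rw [PySem.List.max?_id_cons]; rfl

lemma pv_sum_le_natAbs : ∀ l : List Int, l.sum ≤ ((l.map Int.natAbs).sum : Int) := by
  intro l
  induction l with
  | nil => simp
  | cons x xs ih =>
      simp only [List.sum_cons, List.map_cons, Nat.cast_add]
      have : x ≤ (x.natAbs : Int) := Int.le_natAbs
      omega

lemma pv_mem_le_natAbs_sum {l : List Int} {x : Int} (h : x ∈ l) :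
    x ≤ ((l.map Int.natAbs).sum : Int) := by
  induction l with
  | nil => simp at h
  | cons y ys ih =>
      simp only [List.map_cons, List.sum_cons, Nat.cast_add]
      rcases List.mem_cons.mp h with rfl | h'
      · have h1 : x ≤ (x.natAbs : Int) := Int.le_natAbs
        have h2 : (0 : Int) ≤ ((ys.map Int.natAbs).sum : Int) := by positivity
        omega
      · have h1 := ih h'
        have h2 : (0 : Int) ≤ (y.natAbs : Int) := by positivity
        omega

-- the slice boundaries are a take/drop split at one position
lemma pv_slice_split (a : List Int) (k : Int) : ∃ S : Nat,
    PySem.List.slice a none (some k) = a.take S ∧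
      PySem.List.slice a (some k) none = a.drop S := by
  by_cases hk : 0 ≤ k
  · exact ⟨k.toNat, PySem.List.slice_to _ hk, PySem.List.slice_from _ hk⟩
  · obtain ⟨m, rfl⟩ : ∃ m : Nat, k = -(m : Int) := ⟨(-k).toNat, by omega⟩
    have hm1 : 0 < m := by omega
    exact ⟨a.length - m, PySem.List.slice_to_neg_natCast a m hm1,
      PySem.List.slice_from_neg_natCast a m hm1⟩

-- ===== VERDICT (by name: the statement is the Claim_ definition above) =====
theorem time_count_spec : Claim_equal_time_count := by
  intro a k _hdom hpre
  obtain ⟨hrne, hbranch⟩ := hpre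
  show time_count a k = time_count_alt a k
  obtain ⟨S, hre, hqe⟩ := pv_slice_split a k
  have hA : time_count a k =
      pvLoopA ((a.map Int.natAbs).sum + 1) (a.take S) (a.drop S) 0 := by
    show pvLoopA _ (PySem.List.slice a none (some k)) (PySem.List.slice a (some k) none) 0 = _
    rw [hre, hqe]
  have hB : time_count_alt a k =
      (PySem.List.max? ((a.drop S).foldl pvAssign (a.take S)) (fun y => y)).getD 0 := by
    show (PySem.List.max? ((PySem.List.slice a (some k) none).foldl pvAssign
      (PySem.List.slice a none (some k))) (fun y => y)).getD 0 = _
    rw [hre, hqe]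
  rw [hre] at hrne
  rw [hre, hqe] at hbranch
  -- total-service-time bookkeeping for the loop's fuel
  have hsplitsum : ((a.take S).map Int.natAbs).sum + ((a.drop S).map Int.natAbs).sum =
      (a.map Int.natAbs).sum := by
    rw [List.map_take, List.map_drop]
    exact List.sum_take_add_sum_drop _ S
  have hmaxregs : pvMax (a.take S) ≤ (((a.take S).map Int.natAbs).sum : Int) :=
    pv_mem_le_natAbs_sum (pvMax_mem hrne)
  rcases hbranch with ⟨hqnil, hmax0⟩ | ⟨hqne, h0, hq1, hfeas⟩
  · -- no waiting queue: both sides are the register maximum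
    obtain ⟨r, rs, hcons⟩ : ∃ r rs, a.take S = r :: rs := by
      cases hc : a.take S with
      | nil => exact absurd hc hrne
      | cons r rs => exact ⟨r, rs, rfl⟩
    rw [hcons] at hmax0 hmaxregs hsplitsum
    have hfuel : (rs.foldl max r).toNat < (a.map Int.natAbs).sum + 1 := by
      have : pvMax (r :: rs) = rs.foldl max r := rfl
      rw [this] at hmax0 hmaxregs
      omega
    rw [hA, hB, hqnil, hcons]
    rw [pv_loopA_no_que _ r rs 0 (by exact hmax0) hfuel]
    simp only [List.foldl_nil]
    rw [pvMax_getD (by simp)]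
    show 0 + rs.foldl max r = rs.foldl max r
    omega
  · -- waiting queue: both sides are the makespan of the greedy schedule
    have hbound : pvMax (pvSched (a.take S) (a.drop S)) ≤ ((a.map Int.natAbs).sum : Int) := by
      have hb := pvSched_bound (a.drop S).length (a.drop S) (a.take S) le_rfl hrne h0 hq1
      have hqsum : (a.drop S).sum ≤ (((a.drop S).map Int.natAbs).sum : Int) :=
        pv_sum_le_natAbs _
      have hcast : (((a.take S).map Int.natAbs).sum : Int) + (((a.drop S).map Int.natAbs).sum : Int)
          = ((a.map Int.natAbs).sum : Int) := by exact_mod_cast congrArg Nat.cast hsplitsum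
      omega
    have hfuel : (pvMax (pvSched (a.take S) (a.drop S))).toNat < (a.map Int.natAbs).sum + 1 := by
      omega
    have hAval := pvLoopA_main ((a.map Int.natAbs).sum + 1) (a.take S) (a.drop S) 0
      hrne h0 hq1 hfeas hfuel
    have hBperm : ((a.drop S).foldl pvAssign (a.take S)).Perm
        (pvSched (a.take S) (a.drop S)) := pvB_fold _ _ hrne hq1 hfeas
    have hfold_ne : (a.drop S).foldl pvAssign (a.take S) ≠ [] := by
      intro h
      rw [h] at hBperm
      exact (pvSched_ne_nil (a.drop S).length _ _ le_rfl hrne) hBperm.nil_eq.symm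
    rw [hA, hB, hAval, pvMax_getD hfold_ne, pvMax_perm hBperm]
    omega
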